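-- pv_equiv track=rewrite | github.com/ecly/adventofcode2023 | day17/day17.py | tail_directional_length
-- ===== SOURCE A (Python) =====
-- def tail_directional_length(path):
--     dx, dy = None, None
--     c = 0
--     for (ax, ay), (bx, by) in zip(path[::-1], path[-2::-1]):
--         ndx = ax - bx
--         ndy = ay - by
--         if dx is not None:
--             if ndx != dx or ndy != dy:
--                 break
--
--         c += 1
--         dx, dy = ndx, ndy
--
--     return c
-- ===== SOURCE B (Python) =====
-- def tail_directional_length(path):
--     dirs = [(bx - ax, by - ay) for (ax, ay), (bx, by) in zip(path, path[1:])]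
--     if not dirs:
--         return 0
--     last = dirs[-1]
--     c = 0
--     for d in reversed(dirs):
--         if d != last:
--             break
--         c += 1
--     return c
-- ===== Notes on version B (the rewrite author's own statement) =====
-- stated objective: alternative
-- what changed: A walks the path backward with zipped reversed slices and an early-exit loop carrying an Option direction state; B first builds the full forward list of direction deltas with zip(path, path[1:]), then separately counts the trailing run of entries equal to dirs[-1].
import Mathlib
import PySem

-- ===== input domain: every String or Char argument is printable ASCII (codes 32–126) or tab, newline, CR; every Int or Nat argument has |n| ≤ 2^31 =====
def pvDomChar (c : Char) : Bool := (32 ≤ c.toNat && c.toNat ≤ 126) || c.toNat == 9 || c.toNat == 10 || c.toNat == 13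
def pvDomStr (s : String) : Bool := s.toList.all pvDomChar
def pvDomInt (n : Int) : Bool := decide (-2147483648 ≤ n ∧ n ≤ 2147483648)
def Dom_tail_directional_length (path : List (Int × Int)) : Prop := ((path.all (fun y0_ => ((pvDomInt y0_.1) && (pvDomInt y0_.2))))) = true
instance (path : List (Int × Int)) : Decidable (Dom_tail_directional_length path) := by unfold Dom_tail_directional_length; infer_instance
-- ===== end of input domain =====

-- B replaces A's single early-exit backward walk by a build-all-forward-deltas table
-- followed by a separate trailing-run scan (objective: alternative decomposition, same cost).


-- ===== PORT A =====
-- A's for-loop over zip(path[::-1], path[-2::-1]) with state (dx,dy as an Option) and c,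
-- with the early 'break'.
def pvLoopA : List ((Int × Int) × (Int × Int)) → Option (Int × Int) → Int → Int
  | [], _, c => c
  | (a, b) :: rest, d?, c =>
    let ndx := a.1 - b.1
    let ndy := a.2 - b.2
    match d? with
    | some d =>
      if ndx ≠ d.1 ∨ ndy ≠ d.2 then c
      else pvLoopA rest (some (ndx, ndy)) (c + 1)
    | none => pvLoopA rest (some (ndx, ndy)) (c + 1)

def tail_directional_length (path : List (Int × Int)) : Int :=
  -- path[::-1] and path[-2::-1]: extended slices; step -1 always yields a list (getD default unreachable)
  pvLoopA (((PySem.List.slice? path none none (-1)).getD []).zip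
           ((PySem.List.slice? path (some (-2)) none (-1)).getD [])) none 0

-- ===== PORT B =====
-- B's 'for d in reversed(dirs): if d != last: break; c += 1' loop.
def pvCountB : List (Int × Int) → (Int × Int) → Int → Int
  | [], _, c => c
  | d :: rest, last, c => if d ≠ last then c else pvCountB rest last (c + 1)

def tail_directional_length_alt (path : List (Int × Int)) : Int :=
  let dirs := (path.zip (PySem.List.slice path (some 1) none)).map
    (fun ab => (ab.2.1 - ab.1.1, ab.2.2 - ab.1.2))
  if dirs.isEmpty then 0
  else
    match PySem.List.pyGet? dirs (-1) with
    | none => 0  -- unreachable: dirs is nonempty here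
    | some last => pvCountB dirs.reverse last 0

-- ===== PRECONDITION & SPEC =====
def Spec_tail_directional_length (path : List (Int × Int)) (out : Int) : Prop := out = tail_directional_length_alt path
instance (path : List (Int × Int)) (out : Int) : Decidable (Spec_tail_directional_length path out) := by unfold Spec_tail_directional_length; infer_instance

-- ===== CLAIM (what is proved, stated in full; the proofs are below) =====
def Claim_equal_tail_directional_length : Prop := ∀ (path : List (Int × Int)), Dom_tail_directional_length path → Spec_tail_directional_length path (tail_directional_length path)

-- ===== LEMMAS AND PROOFS =====

-- A's delta on a (later, earlier) pair
def pvDelA (ab : (Int × Int) × (Int × Int)) : Int × Int := (ab.1.1 - ab.2.1, ab.1.2 - ab.2.2)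

theorem revIdx {α : Type} (xs : List α) :
    ∀ c, c ≤ xs.length → List.filterMap (fun k => xs[c - 1 - k]?) (List.range c) = (xs.take c).reverse := by
  intro c
  induction c with
  | zero => simp
  | succ c ih =>
    intro h
    rw [List.range_succ_eq_map]
    simp only [List.filterMap_cons, List.filterMap_map]
    have hc : c < xs.length := by omega
    have h1 : xs[c + 1 - 1 - 0]? = some xs[c] := by
      simp [hc]
    rw [h1]
    have h2 : (List.filterMap ((fun k => xs[c + 1 - 1 - k]?) ∘ Nat.succ) (List.range c))
        = List.filterMap (fun k => xs[c - 1 - k]?) (List.range c) := by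
      apply List.filterMap_congr
      intro k hk
      simp only [Function.comp]
      congr 1
      omega
    rw [h2, ih (by omega)]
    have ht : List.take (c+1) xs = List.take c xs ++ [xs[c]] := by
      rw [List.take_add_one]
      simp [List.getElem?_eq_getElem hc]
    rw [ht, List.reverse_append]
    simp

theorem pvSliceNeg2 {α : Type} (xs : List α) :
    PySem.List.slice? xs (some (-2)) none (-1) = some xs.dropLast.reverse := by
  simp [PySem.List.slice?, PySem.List.sliceIndices]
  by_cases h : 1 < xs.length
  · simp only [h, if_pos]
    have hcnt : (max (-2 + (xs.length : Int)) (-1) + 1).toNat = xs.length - 1 := by omega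
    rw [hcnt]
    have hfm : List.filterMap (fun k : Nat => xs[(max (-2 + (xs.length : Int)) (-1) + -(k : Int)).toNat]?) (List.range (xs.length - 1))
        = List.filterMap (fun k : Nat => xs[xs.length - 1 - 1 - k]?) (List.range (xs.length - 1)) := by
      apply List.filterMap_congr
      intro k hk
      rw [List.mem_range] at hk
      congr 1
      omega
    rw [hfm, revIdx xs (xs.length - 1) (by omega), List.dropLast_eq_take]
  · simp only [h]
    rcases xs with _ | ⟨a, _ | ⟨b, t⟩⟩ <;> simp_all

theorem pvPyGetNeg1 {α : Type} (xs : List α) :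
    PySem.List.pyGet? xs (-1) = xs.getLast? := by
  simp [PySem.List.pyGet?, PySem.List.pyIdx?]
  rw [List.getLast?_eq_getElem?]
  split
  · simp
  · rename_i h
    have h0 : xs.length = 0 := by omega
    simp [List.eq_nil_of_length_eq_zero h0]

-- A's loop with a set direction is B's counting loop on the mapped deltas
theorem pvLoopA_eq_countB (zs : List ((Int × Int) × (Int × Int))) (d : Int × Int) (c : Int) :
    pvLoopA zs (some d) c = pvCountB (zs.map pvDelA) d c := by
  obtain ⟨d1, d2⟩ := d
  induction zs generalizing c with
  | nil => rfl
  | cons z rest ih =>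
    obtain ⟨a, b⟩ := z
    simp only [pvLoopA, pvCountB, List.map_cons, pvDelA]
    by_cases h1 : a.1 - b.1 = d1 <;> by_cases h2 : a.2 - b.2 = d2 <;>
      simp [h1, h2, Prod.ext_iff, ih]

-- the structural bridge: A's zipped list, mapped by its delta, is B's dirs reversed
theorem pvZipBridge (path : List (Int × Int)) :
    ((path.reverse.zip path.dropLast.reverse).map pvDelA) =
      ((path.zip path.tail).map
        (fun ab => (ab.2.1 - ab.1.1, ab.2.2 - ab.1.2))).reverse := by
  apply List.ext_getElem
  · simp
  · intro i h1 h2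
    have hi : i + 2 ≤ path.length := by
      simp at h1
      omega
    simp [pvDelA, List.getElem_reverse, List.getElem_zip, List.getElem_dropLast,
      List.getElem_tail, Prod.ext_iff]
    have hidx : path.length - 1 - 1 - i + 1 = path.length - 1 - i := by omega
    simp [hidx]

-- ===== VERDICT (by name: the statement is the Claim_ definition above) =====
theorem tail_directional_length_spec : Claim_equal_tail_directional_length := by
  intro path _
  unfold Spec_tail_directional_length tail_directional_length tail_directional_length_alt
  rw [PySem.List.slice?_none_none_neg_one, pvSliceNeg2, PySem.List.slice_from_one]
  simp only [Option.getD_some, pvPyGetNeg1]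
  rcases hrev : ((path.zip path.tail).map
      (fun ab => (ab.2.1 - ab.1.1, ab.2.2 - ab.1.2))).reverse with _ | ⟨w, ws⟩
  · have hnil : (path.zip path.tail).map
        (fun ab => (ab.2.1 - ab.1.1, ab.2.2 - ab.1.2)) = [] := by
      simpa using congrArg List.reverse hrev
    have hza : (path.reverse.zip path.dropLast.reverse).map pvDelA = [] := by
      rw [pvZipBridge, hrev]
    have hza' : path.reverse.zip path.dropLast.reverse = [] := by
      simpa using hza
    simp [hza', hnil, pvLoopA]
  · have hne : (path.zip path.tail).map
        (fun ab => (ab.2.1 - ab.1.1, ab.2.2 - ab.1.2)) ≠ [] := by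
      intro h0
      rw [h0] at hrev
      simp at hrev
    have hIE : ((path.zip path.tail).map
        (fun ab => (ab.2.1 - ab.1.1, ab.2.2 - ab.1.2))).isEmpty = false := by
      rw [Bool.eq_false_iff]
      intro h0
      exact hne (List.isEmpty_iff.mp h0)
    have hlast : ((path.zip path.tail).map
        (fun ab => (ab.2.1 - ab.1.1, ab.2.2 - ab.1.2))).getLast? = some w := by
      rw [← List.head?_reverse, hrev]
      rfl
    have hmap : (path.reverse.zip path.dropLast.reverse).map pvDelA = w :: ws := by
      rw [pvZipBridge, hrev]
    rcases List.map_eq_cons_iff.1 hmap with ⟨z, rest, hz, hfz, hrest⟩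
    rw [hz]
    obtain ⟨a, b⟩ := z
    simp only [hIE, Bool.false_eq_true, if_false, hlast, hrev, pvLoopA, pvCountB]
    have hw : (a.1 - b.1, a.2 - b.2) = w := hfz
    rw [pvLoopA_eq_countB, hrest, hw, if_neg (by simp)]
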